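-- pv_equiv track=rewrite | github.com/adrianogil/NaPoGenMo18 | python/grammar.py | parse_tags_from
-- ===== SOURCE A (Python) =====
-- def parse_tags_from(text):
--     '''
--         Tags are between ##
--     '''
--     current_tag = ''
--     found_tags = []
--     inside_tag = False
--
--     for s in text:
--         if s == '#':
--             if inside_tag:
--                 found_tags.append(current_tag)
--             current_tag = ''
--             inside_tag = not inside_tag
--         elif inside_tag:
--             current_tag = current_tag + s
--
--     return found_tags
-- ===== SOURCE B (Python) =====
-- def parse_tags_from(text):
--     parts = text.split('#')
--     return [parts[i] for i in range(1, len(parts) - 1, 2)]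
-- ===== Notes on version B (the rewrite author's own statement) =====
-- stated objective: idiomatic
-- what changed: Replaces the char-by-char toggling state machine with one str.split on the delimiter followed by picking the odd-index parts (excluding the trailing unclosed part).
import Mathlib
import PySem

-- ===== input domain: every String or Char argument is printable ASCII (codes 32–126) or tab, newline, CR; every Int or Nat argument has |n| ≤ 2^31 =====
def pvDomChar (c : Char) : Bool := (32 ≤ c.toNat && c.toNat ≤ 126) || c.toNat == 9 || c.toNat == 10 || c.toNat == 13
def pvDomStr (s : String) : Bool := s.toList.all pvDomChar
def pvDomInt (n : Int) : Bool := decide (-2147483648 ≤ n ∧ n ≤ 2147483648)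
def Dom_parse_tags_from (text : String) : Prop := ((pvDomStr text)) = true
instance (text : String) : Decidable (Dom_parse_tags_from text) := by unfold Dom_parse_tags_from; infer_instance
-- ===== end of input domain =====

-- B replaces A's char-by-char toggling state machine by one split on the delimiter plus an odd-index pick (idiomatic; a timing run measured it faster by a constant factor: C-level str.split vs per-char Python loop).

-- ===== PORT A =====
-- A's for-loop over the characters, with state (current_tag, found_tags, inside_tag)
def parseTagsLoop : List Char → List Char → List (List Char) → Bool → List (List Char)
  | [], _, found, _ => found
  | c :: rest, cur, found, inside =>
    if c = '#' then
      parseTagsLoop rest [] (if inside then found ++ [cur] else found) (!inside)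
    else
      parseTagsLoop rest (if inside then cur ++ [c] else cur) found inside

def parse_tags_from (text : String) : List String :=
  (parseTagsLoop text.toList [] [] false).map String.ofList

-- ===== PORT B =====
def parse_tags_from_alt (text : String) : List String :=
  let parts := PySem.Chars.splitOn text.toList ['#']
  ((PySem.List.pyRange 1 (PySem.List.len parts - 1) 2).map
    (fun i => PySem.List.pyGetD parts i [])).map String.ofList

-- ===== PRECONDITION & SPEC =====
def Spec_parse_tags_from (text : String) (out : List String) : Prop := out = parse_tags_from_alt text
instance (text : String) (out : List String) : Decidable (Spec_parse_tags_from text out) := by unfold Spec_parse_tags_from; infer_instance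

-- ===== CLAIM (what is proved, stated in full; the proofs are below) =====
def Claim_equal_parse_tags_from : Prop := ∀ (text : String), Dom_parse_tags_from text → Spec_parse_tags_from text (parse_tags_from text)

-- ===== LEMMAS AND PROOFS =====

-- reference splitter: split a char list on '#'
def mySplit : List Char → List (List Char)
  | [] => [[]]
  | c :: rest =>
    if c = '#' then [] :: mySplit rest
    else
      match mySplit rest with
      | p :: ps => (c :: p) :: ps
      | [] => [[c]]

theorem mySplit_ne_nil (l : List Char) : mySplit l ≠ [] := by
  cases l with
  | nil => simp [mySplit]
  | cons c rest =>
    simp only [mySplit]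
    split
    · simp
    · cases h : mySplit rest <;> simp

-- the tags A emits, read off the split parts: odd positions, last part excluded
def tagsOf : List (List Char) → List (List Char)
  | [] => []
  | [_] => []
  | _ :: q :: rest => if rest = [] then [] else q :: tagsOf rest

theorem splitOn_go_eq (l : List Char) : ∀ (fuel : Nat) (cur : List Char) (acc : List (List Char)),
    l.length ≤ fuel →
    PySem.Chars.splitOn.go ['#'] fuel l cur acc =
      acc.reverse ++ (match mySplit l with
        | p :: ps => (cur.reverse ++ p) :: ps
        | [] => [cur.reverse]) := by
  induction l with
  | nil =>
    intro fuel cur acc _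
    cases fuel <;> simp [PySem.Chars.splitOn.go, mySplit]
  | cons c rest ih =>
    intro fuel cur acc hf
    cases fuel with
    | zero => simp at hf
    | succ fuel =>
      by_cases hc : c = '#'
      · subst hc
        have hpre : List.isPrefixOf ['#'] ('#' :: rest) = true := by
          simp [List.isPrefixOf]
        rw [show PySem.Chars.splitOn.go ['#'] (fuel + 1) ('#' :: rest) cur acc =
            PySem.Chars.splitOn.go ['#'] fuel (List.drop (List.length ['#']) ('#' :: rest)) [] (cur.reverse :: acc) by
          simp [PySem.Chars.splitOn.go, hpre]]
        simp only [List.length_singleton, List.drop_succ_cons, List.drop_zero]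
        rw [ih fuel [] (cur.reverse :: acc) (by simpa using Nat.le_of_succ_le_succ hf)]
        simp only [mySplit, reduceIte]
        cases h : mySplit rest with
        | nil => exact absurd h (mySplit_ne_nil rest)
        | cons p ps => simp
      · have hpre : List.isPrefixOf ['#'] (c :: rest) = false := by
          simp [List.isPrefixOf, Ne.symm hc]
        rw [show PySem.Chars.splitOn.go ['#'] (fuel + 1) (c :: rest) cur acc =
            PySem.Chars.splitOn.go ['#'] fuel rest (c :: cur) acc by
          rw [PySem.Chars.splitOn.go.eq_def]; simp [hpre]]
        rw [ih fuel (c :: cur) acc (Nat.le_of_succ_le_succ hf)]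
        simp only [mySplit, if_neg hc]
        cases h : mySplit rest with
        | nil => exact absurd h (mySplit_ne_nil rest)
        | cons p ps => simp

theorem splitOn_eq_mySplit (l : List Char) : PySem.Chars.splitOn l ['#'] = mySplit l := by
  show PySem.Chars.splitOn.go ['#'] (l.length + 1) l [] [] = mySplit l
  rw [splitOn_go_eq l (l.length + 1) [] [] (Nat.le_succ _)]
  cases h : mySplit l with
  | nil => exact absurd h (mySplit_ne_nil l)
  | cons p ps => simp

-- the tags emitted when the scan starts inside a tag with accumulated cur
def tagsIn (cur : List Char) : List (List Char) → List (List Char)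
  | [] => []
  | [_] => []
  | q :: rest => (cur ++ q) :: tagsOf rest

theorem parseTagsLoop_eq (l : List Char) : ∀ (cur : List Char) (found : List (List Char)) (inside : Bool),
    parseTagsLoop l cur found inside =
      found ++ (if inside then tagsIn cur (mySplit l) else tagsOf (mySplit l)) := by
  induction l with
  | nil =>
    intro cur found inside
    cases inside <;> simp [parseTagsLoop, mySplit, tagsIn, tagsOf]
  | cons c rest ih =>
    intro cur found inside
    by_cases hc : c = '#'
    · subst hc
      rw [show parseTagsLoop ('#' :: rest) cur found inside =
          parseTagsLoop rest [] (if inside then found ++ [cur] else found) (!inside) by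
        simp [parseTagsLoop]]
      rw [ih [] (if inside then found ++ [cur] else found) (!inside)]
      simp only [mySplit, reduceIte]
      cases h : mySplit rest with
      | nil => exact absurd h (mySplit_ne_nil rest)
      | cons p ps =>
        cases inside with
        | false =>
          cases ps <;> simp [tagsIn, tagsOf]
        | true =>
          cases ps <;> simp [tagsIn, tagsOf]
    · rw [show parseTagsLoop (c :: rest) cur found inside =
          parseTagsLoop rest (if inside then cur ++ [c] else cur) found inside by
        simp [parseTagsLoop, hc]]
      rw [ih (if inside then cur ++ [c] else cur) found inside]
      simp only [mySplit, if_neg hc]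
      cases h : mySplit rest with
      | nil => exact absurd h (mySplit_ne_nil rest)
      | cons p ps =>
        cases inside with
        | false => cases ps <;> simp [tagsOf]
        | true => cases ps <;> simp [tagsIn]

-- the pyRange pick as a Nat-range map
theorem pick_eq_range (parts : List (List Char)) :
    (PySem.List.pyRange 1 (PySem.List.len parts - 1) 2).map
      (fun i => PySem.List.pyGetD parts i []) =
    (List.range ((parts.length - 1) / 2)).map (fun k => parts.getD (1 + 2 * k) []) := by
  rw [PySem.List.pyRange_of_pos 1 (PySem.List.len parts - 1) (by norm_num)]
  rw [List.map_map]
  simp only [PySem.List.len_eq]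
  by_cases h : (1 : Int) < (parts.length : Int) - 1
  · rw [if_pos h]
    have hcnt : (((parts.length : Int) - 1 - 1 + 2 - 1) / 2).toNat = (parts.length - 1) / 2 := by
      have h2 : 2 ≤ parts.length := by omega
      omega
    rw [hcnt]
    apply List.map_congr_left
    intro k hk
    simp only [Function.comp]
    have : (1 : Int) + 2 * (k : Int) = ((1 + 2 * k : Nat) : Int) := by push_cast; ring
    rw [this, PySem.List.pyGetD_natCast]
  · rw [if_neg h]
    have : (parts.length - 1) / 2 = 0 := by omega
    rw [this]
    simp

theorem range_pick_eq_tagsOf (parts : List (List Char)) :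
    (List.range ((parts.length - 1) / 2)).map (fun k => parts.getD (1 + 2 * k) []) = tagsOf parts := by
  induction parts using tagsOf.induct with
  | case1 => simp [tagsOf]
  | case2 p => simp [tagsOf]
  | case3 p q => simp [tagsOf]
  | case4 p q rest hne ih =>
    have hlen : ((p :: q :: rest).length - 1) / 2 = (rest.length - 1) / 2 + 1 := by
      cases rest with
      | nil => exact absurd rfl hne
      | cons r rest' => simp only [List.length_cons]; omega
    rw [hlen, List.range_succ_eq_map, List.map_cons, List.map_map]
    simp only [tagsOf, if_neg hne]
    congr 1

theorem main_eq (l : List Char) :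
    parseTagsLoop l [] [] false =
      (PySem.List.pyRange 1 (PySem.List.len (PySem.Chars.splitOn l ['#']) - 1) 2).map
        (fun i => PySem.List.pyGetD (PySem.Chars.splitOn l ['#']) i []) := by
  rw [splitOn_eq_mySplit, pick_eq_range, range_pick_eq_tagsOf, parseTagsLoop_eq]
  simp

-- ===== VERDICT (by name: the statement is the Claim_ definition above) =====
theorem parse_tags_from_spec : Claim_equal_parse_tags_from := by
  intro text _
  show parse_tags_from text = parse_tags_from_alt text
  unfold parse_tags_from parse_tags_from_alt
  rw [main_eq]
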